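-- pv_equiv track=rewrite | github.com/nlutala/data-structures-and-algorithms-gg | dsa_problems/arrays/level2/max_sum_in_the_configuration.py | max_sum_of_index_and_elem
-- ===== SOURCE A (Python) =====
-- def max_sum_of_index_and_elem(arr: list[int]) -> int:
--     """
--     Given an array arr[] of n integers, find the maximum that maximizes the
--     sum of the value of i*arr[i] where i varies from 0 to n-1.\n
--
--     :param - array (list of integers)\n
--
--     returns the maximum sum of i * arr[i] among all rotations of a given array.
--     """
--     arrays = []
--     max_sum = 0
--
--     for i in range(len(arr)):
--         temp_array = arr[i+1:] + arr[0:i+1]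
--         arrays.append(temp_array)
--
--     for array in arrays:
--         current_sum = 0
--         for i, elem in enumerate(array):
--             current_sum += i * elem
--
--         if current_sum > max_sum:
--             max_sum = current_sum
--
--     return max_sum
-- ===== SOURCE B (Python) =====
-- def max_sum_of_index_and_elem(arr: list[int]) -> int:
--     # O(n): walk the rotations with the incremental formula
--     # next_sum = cur_sum + n*moved_element - total.
--     n = len(arr)
--     total = sum(arr)
--     s = sum(i * v for i, v in enumerate(arr))
--     best = 0
--     for x in arr:
--         s += n * x - total
--         if s > best:
--             best = s
--     return best
-- ===== Notes on version B (the rewrite author's own statement) =====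
-- stated objective: faster
-- what changed: Instead of materialising every rotation and re-summing i*a[i] for each (O(n^2)), B computes the base sum and total once and walks all n rotations in one pass with the incremental identity next_sum = cur_sum + n*moved_element - total.
import Mathlib
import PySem

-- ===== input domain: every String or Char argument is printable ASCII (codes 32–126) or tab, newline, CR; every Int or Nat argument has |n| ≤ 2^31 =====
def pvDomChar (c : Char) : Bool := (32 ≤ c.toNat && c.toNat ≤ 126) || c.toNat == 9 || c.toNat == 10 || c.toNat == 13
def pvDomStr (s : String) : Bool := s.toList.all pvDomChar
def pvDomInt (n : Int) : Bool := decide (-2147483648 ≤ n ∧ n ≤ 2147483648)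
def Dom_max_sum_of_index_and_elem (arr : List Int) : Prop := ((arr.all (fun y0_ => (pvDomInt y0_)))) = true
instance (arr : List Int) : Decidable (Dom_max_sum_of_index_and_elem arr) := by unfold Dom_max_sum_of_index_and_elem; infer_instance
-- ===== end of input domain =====

-- B replaces A's O(n^2) "materialise every rotation and re-sum it" with a single
-- O(n) pass using the incremental identity next_sum = cur_sum + n*moved - total.

-- ===== PORT A =====
def max_sum_of_index_and_elem (arr : List Int) : Int :=
  let arrays := (PySem.List.pyRange 0 (arr.length) 1).foldl
    (fun acc i =>
      acc ++ [PySem.List.slice arr (some (i + 1)) none ++ PySem.List.slice arr (some 0) (some (i + 1))]) []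
  arrays.foldl
    (fun max_sum array =>
      let current_sum := (PySem.List.enumerate array).foldl (fun c p => c + p.1 * p.2) 0
      if current_sum > max_sum then current_sum else max_sum) 0

-- ===== PORT B =====
def max_sum_of_index_and_elem_alt (arr : List Int) : Int :=
  let n : Int := arr.length
  let total := arr.sum
  let s0 := (PySem.List.enumerate arr).foldl (fun c p => c + p.1 * p.2) 0
  let res := arr.foldl
    (fun (sb : Int × Int) x =>
      let s := sb.1 + n * x - total
      (s, if s > sb.2 then s else sb.2)) (s0, 0)
  res.2

-- ===== PRECONDITION & SPEC =====
def Spec_max_sum_of_index_and_elem (arr : List Int) (out : Int) : Prop := out = max_sum_of_index_and_elem_alt arr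
instance (arr : List Int) (out : Int) : Decidable (Spec_max_sum_of_index_and_elem arr out) := by unfold Spec_max_sum_of_index_and_elem; infer_instance

-- ===== CLAIM (what is proved, stated in full; the proofs are below) =====
def Claim_equal_max_sum_of_index_and_elem : Prop := ∀ (arr : List Int), Dom_max_sum_of_index_and_elem arr → Spec_max_sum_of_index_and_elem arr (max_sum_of_index_and_elem arr)

-- ===== LEMMAS AND PROOFS =====

/-- `Ssum l = Σ i * l[i]`, by the recursion `Ssum (x :: xs) = Ssum xs + xs.sum`. -/
def Ssum : List Int → Int
  | [] => 0
  | _ :: xs => Ssum xs + xs.sum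

/-- The enumerate-fold both ports use computes `Ssum`, with offset `j`. -/
theorem enumFold (l : List Int) : ∀ (c j : Int),
    (PySem.List.enumerate l j).foldl (fun c p => c + p.1 * p.2) c = c + j * l.sum + Ssum l := by
  induction l with
  | nil => intro c j; simp [PySem.List.enumerate, Ssum]
  | cons x xs ih =>
    intro c j
    rw [PySem.List.enumerate_cons]
    simp only [List.foldl_cons, ih, Ssum, List.sum_cons]
    ring

theorem Ssum_append_singleton (x : Int) (l : List Int) :
    Ssum (l ++ [x]) = Ssum l + l.length * x := by
  induction l with
  | nil => simp [Ssum]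
  | cons y ys ih => simp only [List.cons_append, Ssum, ih, List.sum_append, List.length_cons,
      List.sum_cons, List.sum_nil]; push_cast; ring

/-- The k-th left rotation of `arr`. -/
def rot (arr : List Int) (k : Nat) : List Int := arr.drop k ++ arr.take k

theorem rot_sum (arr : List Int) (k : Nat) : (rot arr k).sum = arr.sum := by
  rw [rot, List.sum_append, add_comm, ← List.sum_append, List.take_append_drop]

theorem rot_succ (arr : List Int) (k : Nat) (h : k < arr.length) :
    rot arr (k + 1) = (arr.drop (k + 1) ++ arr.take k) ++ [arr[k]] := by
  rw [rot, List.take_add_one, List.getElem?_eq_getElem h]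
  simp [List.append_assoc]

theorem sigma_succ (arr : List Int) (k : Nat) (h : k < arr.length) :
    Ssum (rot arr (k + 1)) = Ssum (rot arr k) + arr.length * arr[k] - arr.sum := by
  have hmsum : (arr.drop (k + 1) ++ arr.take k).sum = arr.sum - arr[k] := by
    have := rot_sum arr k
    rw [rot, List.drop_eq_getElem_cons h] at this
    simp only [List.cons_append, List.sum_cons] at this
    omega
  have hmlen : ((arr.drop (k + 1) ++ arr.take k).length : Int) = (arr.length : Int) - 1 := by
    have : k + 1 ≤ arr.length := h
    simp [List.length_append, List.length_drop, List.length_take]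
    omega
  have hrotk : Ssum (rot arr k) = Ssum (arr.drop (k + 1) ++ arr.take k) + (arr.drop (k + 1) ++ arr.take k).sum := by
    rw [rot, List.drop_eq_getElem_cons h]
    simp only [List.cons_append, Ssum, List.sum_append]
  rw [rot_succ arr k h, Ssum_append_singleton, hrotk, hmsum, hmlen]
  ring

/-- B's loop over the suffix `arr.drop k`, started at the k-th rotation sum,
    folds the A-side max over the remaining rotation sums. -/
theorem B_fold (arr : List Int) : ∀ (d k : Nat) (b : Int), arr.length - k = d →
    ((arr.drop k).foldl
        (fun (sb : Int × Int) x =>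
          (sb.1 + (arr.length : Int) * x - arr.sum,
           if sb.1 + (arr.length : Int) * x - arr.sum > sb.2 then sb.1 + (arr.length : Int) * x - arr.sum else sb.2))
        (Ssum (rot arr k), b)).2
      = (List.range' k d).foldl
          (fun m j => if Ssum (rot arr (j + 1)) > m then Ssum (rot arr (j + 1)) else m) b := by
  intro d
  induction d with
  | zero =>
    intro k b hd
    have hk : arr.length ≤ k := by omega
    rw [List.drop_eq_nil_of_le hk]
    simp
  | succ d ih =>
    intro k b hd
    have hk : k < arr.length := by omega
    rw [List.drop_eq_getElem_cons hk, List.foldl_cons, List.range'_succ, List.foldl_cons]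
    have hs : Ssum (rot arr k) + (arr.length : Int) * arr[k] - arr.sum = Ssum (rot arr (k + 1)) := by
      rw [sigma_succ arr k hk]
    simp only [hs]
    exact ih (k + 1) _ (by omega)

theorem rot_zero (arr : List Int) : rot arr 0 = arr := by simp [rot]

-- ===== VERDICT (by name: the statement is the Claim_ definition above) =====
theorem max_sum_of_index_and_elem_spec : Claim_equal_max_sum_of_index_and_elem := by
  intro arr _
  unfold Spec_max_sum_of_index_and_elem max_sum_of_index_and_elem max_sum_of_index_and_elem_alt
  simp only [PySem.List.pyRange_one, PySem.List.foldl_append_singleton_eq_map, List.nil_append,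
    List.foldl_map, enumFold]
  -- identify A's rotation slices with `rot arr (k+1)`
  have hslice : ∀ k : Nat,
      PySem.List.slice arr (some ((k : Int) + 1)) none ++
        PySem.List.slice arr (some 0) (some ((k : Int) + 1)) = rot arr (k + 1) := by
    intro k
    have h1 : (k : Int) + 1 = ((k + 1 : Nat) : Int) := by push_cast; ring
    rw [h1, PySem.List.slice_from_natCast, PySem.List.slice_zero_start, PySem.List.slice_to_natCast,
      rot]
  simp only [zero_mul, zero_add]
  simp only [hslice]
  -- B's loop
  have hB := B_fold arr arr.length 0 0 (by omega)
  rw [rot_zero] at hB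
  simp only [List.drop_zero] at hB
  rw [hB]
  -- align the two folds
  have h2 : ((arr.length : Int) - 0).toNat = arr.length := by omega
  rw [h2, List.range_eq_range']
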